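-- pv_equiv track=rewrite | github.com/AnshRaj112/CogniMarket | evaluate.py | _recent_opponent_status
-- ===== SOURCE A (Python) =====
-- from typing import Any, Callable, Dict, List, Optional
--
-- def _recent_opponent_status(history: List[str], opponent_ids: List[str]) -> Dict[str, str]:
--     """Return latest acceptance status for each opponent from history."""
--     status = {opp: "unknown" for opp in opponent_ids}
--     for turn in reversed(history):
--         lower = turn.lower()
--         for opp in opponent_ids:
--             if lower.startswith(f"{opp}:") and status[opp] == "unknown":
--                 if "accept" in lower and "reject" not in lower:
--                     status[opp] = "accept"
--                 elif "reject" in lower: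
--                     status[opp] = "reject"
--         if all(v != "unknown" for v in status.values()):
--             break
--     return status
-- ===== SOURCE B (Python) =====
-- def _recent_opponent_status(history, opponent_ids):
--     """Return latest acceptance status for each opponent from history."""
--     # Collect the decisive turns once (lowercased, with their verdict), then
--     # answer each opponent by scanning that short list backwards.
--     verdicts = []
--     for turn in history:
--         lower = turn.lower()
--         if "accept" in lower and "reject" not in lower:
--             verdicts.append((lower, "accept"))
--         elif "reject" in lower:
--             verdicts.append((lower, "reject"))
--
--     def last(opp):
--         prefix = opp + ":"
--         for lower, v in reversed(verdicts):
--             if lower.startswith(prefix):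
--                 return v
--         return "unknown"
--
--     return {opp: last(opp) for opp in opponent_ids}
-- ===== Notes on version B (the rewrite author's own statement) =====
-- stated objective: faster
-- what changed: Instead of A's reversed scan that re-tests every opponent against every turn (with an early-exit break and an 'already unknown' guard), B makes one forward pass that collects only the decisive turns (lowercased, with their verdict) and then answers each opponent by a single backward search of that short list.
import Mathlib
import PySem

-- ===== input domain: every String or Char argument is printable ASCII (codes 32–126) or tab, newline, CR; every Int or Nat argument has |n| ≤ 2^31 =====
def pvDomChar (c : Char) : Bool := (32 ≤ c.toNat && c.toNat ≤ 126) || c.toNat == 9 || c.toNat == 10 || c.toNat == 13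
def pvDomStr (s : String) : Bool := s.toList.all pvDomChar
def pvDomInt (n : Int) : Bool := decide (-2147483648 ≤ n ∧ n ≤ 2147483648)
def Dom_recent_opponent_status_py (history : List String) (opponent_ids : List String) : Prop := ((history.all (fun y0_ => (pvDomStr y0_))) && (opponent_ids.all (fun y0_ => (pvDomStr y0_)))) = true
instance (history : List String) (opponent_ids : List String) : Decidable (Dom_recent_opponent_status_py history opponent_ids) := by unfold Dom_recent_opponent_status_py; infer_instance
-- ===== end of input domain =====

-- B replaces A's reversed scan with break and per-turn opponent updates by one forward pass
-- collecting the decisive turns, then a per-opponent backward search over that short list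
-- (objective: faster; a timing run measured B faster).


-- ===== PORT A =====
-- inner 'for opp in opponent_ids' body; status[opp] always exists (initialised over
-- opponent_ids), so the getD default "" is never the looked-up value
def pvA_turnStep (lower : List Char) (status : PySem.Dict String String)
    (opp : String) : PySem.Dict String String :=
  if PySem.Chars.startswith lower (opp.toList ++ [':']) && (status.getD opp "" == "unknown") then
    if PySem.Chars.isIn "accept".toList lower && !(PySem.Chars.isIn "reject".toList lower) then
      status.insert opp "accept"
    else if PySem.Chars.isIn "reject".toList lower then
      status.insert opp "reject"
    else status
  else status

-- 'for turn in reversed(history): … if all(...): break' (applied to history.reverse)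
def pvA_loop (opponent_ids : List String) :
    List String → PySem.Dict String String → PySem.Dict String String
  | [], status => status
  | turn :: rest, status =>
    let lower := PySem.Chars.lower turn.toList
    let status' := opponent_ids.foldl (pvA_turnStep lower) status
    if status'.values.all (fun v => !(v == "unknown")) then status'
    else pvA_loop opponent_ids rest status'

def recent_opponent_status_py (history : List String) (opponent_ids : List String) :
    List (String × String) :=
  let status := opponent_ids.foldl (fun d opp => d.insert opp "unknown") PySem.Dict.empty
  (pvA_loop opponent_ids history.reverse status).items

-- ===== PORT B =====
-- forward pass: the decisive turns (lowercased) with their verdict, in order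
def pvB_verdicts (history : List String) : List (List Char × String) :=
  history.foldl (fun acc turn =>
    let lower := PySem.Chars.lower turn.toList
    if PySem.Chars.isIn "accept".toList lower && !(PySem.Chars.isIn "reject".toList lower) then
      acc ++ [(lower, "accept")]
    else if PySem.Chars.isIn "reject".toList lower then
      acc ++ [(lower, "reject")]
    else acc) []

-- 'def last(opp): for lower, v in reversed(verdicts): …' (applied to verdicts.reverse)
def pvB_last (opp : String) : List (List Char × String) → String
  | [] => "unknown"
  | (lower, v) :: rest =>
    if PySem.Chars.startswith lower (opp.toList ++ [':']) then v else pvB_last opp rest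

def recent_opponent_status_py_alt (history : List String) (opponent_ids : List String) :
    List (String × String) :=
  let verdicts := pvB_verdicts history
  (opponent_ids.foldl (fun d opp => d.insert opp (pvB_last opp verdicts.reverse))
    PySem.Dict.empty).items

-- ===== PRECONDITION & SPEC =====
def Spec_recent_opponent_status_py (history : List String) (opponent_ids : List String) (out : List (String × String)) : Prop := out = recent_opponent_status_py_alt history opponent_ids
instance (history : List String) (opponent_ids : List String) (out : List (String × String)) : Decidable (Spec_recent_opponent_status_py history opponent_ids out) := by unfold Spec_recent_opponent_status_py; infer_instance

-- ===== CLAIM (what is proved, stated in full; the proofs are below) =====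
def Claim_equal_recent_opponent_status_py : Prop := ∀ (history : List String) (opponent_ids : List String), Dom_recent_opponent_status_py history opponent_ids → Spec_recent_opponent_status_py history opponent_ids (recent_opponent_status_py history opponent_ids)

-- ===== LEMMAS AND PROOFS =====

-- per-opponent effect of one (lowercased) turn on one status value
def pvStep (lower : List Char) (opp : String) (v : String) : String :=
  if PySem.Chars.startswith lower (opp.toList ++ [':']) && (v == "unknown") then
    if PySem.Chars.isIn "accept".toList lower && !(PySem.Chars.isIn "reject".toList lower) then
      "accept"
    else if PySem.Chars.isIn "reject".toList lower then "reject"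
    else v
  else v

-- key list of a dict after inserting the keys of ids (first occurrences appended)
def pvKeysAfter (ks : List String) : List String → List String
  | [] => ks
  | o :: rest => pvKeysAfter (if o ∈ ks then ks else ks ++ [o]) rest

-- classification of one turn as B's verdicts pass records it
def pvVmap (turn : String) : Option (List Char × String) :=
  let lower := PySem.Chars.lower turn.toList
  if PySem.Chars.isIn "accept".toList lower && !(PySem.Chars.isIn "reject".toList lower) then
    some (lower, "accept")
  else if PySem.Chars.isIn "reject".toList lower then some (lower, "reject")
  else none

lemma pvStep_keep (lower : List Char) (opp : String) (v : String) (hv : v ≠ "unknown") :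
    pvStep lower opp v = v := by
  simp [pvStep, hv]

lemma pvFoldl_step_keep (l : List String) (opp : String) (v : String) (hv : v ≠ "unknown") :
    l.foldl (fun v t => pvStep (PySem.Chars.lower t.toList) opp v) v = v := by
  induction l with
  | nil => rfl
  | cons t rest ih => simp [List.foldl_cons, pvStep_keep _ _ _ hv, ih]

lemma pvStep_eq_self_of_unknown (lower : List Char) (opp : String) (v : String)
    (h : pvStep lower opp v = "unknown") : pvStep lower opp v = v := by
  unfold pvStep at h ⊢
  split_ifs at h ⊢ with h1 h2 h3 <;> simp_all

lemma pvStep_idem (lower : List Char) (opp : String) (v : String) :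
    pvStep lower opp (pvStep lower opp v) = pvStep lower opp v := by
  by_cases h : pvStep lower opp v = "unknown"
  · have hv := pvStep_eq_self_of_unknown _ _ _ h
    rw [hv]
    exact hv
  · exact pvStep_keep _ _ _ h

lemma pvNodup_snoc {ks : List String} {o : String} (h : ks.Nodup) (ho : o ∉ ks) :
    (ks ++ [o]).Nodup := by
  simp [List.nodup_append, h]
  exact fun a ha hao => ho (hao ▸ ha)

lemma pvShaped_contains (ks : List String) (s : String → String) (o : String) :
    (PySem.Dict.mk (ks.map (fun x => (x, s x)))).contains o = decide (o ∈ ks) := by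
  rw [PySem.Dict.contains_eq_decide_mem_keys]
  simp [PySem.Dict.keys]

lemma pvShaped_getD (ks : List String) (s : String → String) (o : String)
    (hnd : ks.Nodup) (ho : o ∈ ks) (d0 : String) :
    (PySem.Dict.mk (ks.map (fun x => (x, s x)))).getD o d0 = s o := by
  apply PySem.Dict.getD_of_mem_items
  · exact List.mem_map_of_mem ho
  · simp [PySem.Dict.keys, Function.comp_def, hnd]

lemma pvShaped_insert_mem (ks : List String) (s : String → String) (o : String) (w : String)
    (_hnd : ks.Nodup) (ho : o ∈ ks) :
    (PySem.Dict.mk (ks.map (fun x => (x, s x)))).insert o w =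
      PySem.Dict.mk (ks.map (fun x => (x, if x = o then w else s x))) := by
  apply PySem.Dict.ext
  rw [PySem.Dict.items_insert_of_contains]
  · show (ks.map _).map _ = _
    rw [List.map_map]
    refine List.map_congr_left (fun x _ => ?_)
    by_cases hx : x = o <;> simp [hx]
  · rw [pvShaped_contains]; simpa using ho

lemma pvShaped_insert_not_mem (ks : List String) (s : String → String) (o : String) (w : String)
    (ho : o ∉ ks) :
    (PySem.Dict.mk (ks.map (fun x => (x, s x)))).insert o w =
      PySem.Dict.mk ((ks ++ [o]).map (fun x => (x, if x = o then w else s x))) := by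
  apply PySem.Dict.ext
  rw [PySem.Dict.items_insert_of_not_contains]
  · show (ks.map _) ++ [(o, w)] = _
    rw [List.map_append]
    congr 1
    · refine List.map_congr_left (fun x hx => ?_)
      have : x ≠ o := fun h => ho (h ▸ hx)
      simp [this]
    · simp
  · rw [pvShaped_contains]; simpa using ho

lemma pvKeysAfter_cons (ks : List String) (o : String) (rest : List String) :
    pvKeysAfter ks (o :: rest) = pvKeysAfter (if o ∈ ks then ks else ks ++ [o]) rest := rfl

lemma pvKeysAfter_nodup (ids : List String) : ∀ ks : List String, ks.Nodup →
    (pvKeysAfter ks ids).Nodup := by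
  induction ids with
  | nil => exact fun ks h => h
  | cons o rest ih =>
    intro ks h
    unfold pvKeysAfter
    by_cases ho : o ∈ ks
    · simpa [ho] using ih ks h
    · simp only [ho, if_false]
      exact ih _ (pvNodup_snoc h ho)

lemma pvKeysAfter_mem (ids : List String) : ∀ ks x,
    x ∈ pvKeysAfter ks ids ↔ x ∈ ks ∨ x ∈ ids := by
  induction ids with
  | nil => simp [pvKeysAfter]
  | cons o rest ih =>
    intro ks x
    unfold pvKeysAfter
    by_cases ho : o ∈ ks
    · rw [if_pos ho, ih]
      constructor
      · rintro (h | h) <;> simp_all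
      · rintro (h | h)
        · exact Or.inl h
        · rcases List.mem_cons.mp h with h | h
          · exact Or.inl (h ▸ ho)
          · exact Or.inr h
    · rw [if_neg ho, ih]
      simp only [List.mem_append, List.mem_cons]
      tauto

-- the dict-comprehension / init-loop: fold of insert with a value depending only on the key
lemma pvBuild_items (G : String → String) (ids : List String) : ∀ (ks : List String)
    (s : String → String), ks.Nodup →
    ids.foldl (fun d o => d.insert o (G o)) (PySem.Dict.mk (ks.map (fun x => (x, s x)))) =
      PySem.Dict.mk ((pvKeysAfter ks ids).map
        (fun x => (x, if x ∈ ids then G x else s x))) := by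
  induction ids with
  | nil => intro ks s _; simp [pvKeysAfter]
  | cons o rest ih =>
    intro ks s hnd
    rw [List.foldl_cons]
    have hfun : ∀ ks' : List String, PySem.Dict.mk (ks'.map (fun x => (x, if x ∈ rest then G x
          else if x = o then G o else s x))) =
        PySem.Dict.mk (ks'.map (fun x => (x, if x ∈ o :: rest then G x else s x))) := by
      intro ks'
      congr 1
      refine List.map_congr_left (fun x _ => ?_)
      by_cases hxo : x = o <;> by_cases hxr : x ∈ rest <;> simp [hxo, hxr]
    by_cases ho : o ∈ ks
    · rw [pvShaped_insert_mem ks s o (G o) hnd ho, ih ks _ hnd, pvKeysAfter_cons, if_pos ho]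
      exact hfun _
    · rw [pvShaped_insert_not_mem ks s o (G o) ho,
        ih (ks ++ [o]) _ (pvNodup_snoc hnd ho), pvKeysAfter_cons, if_neg ho]
      exact hfun _

-- the inner 'for opp in opponent_ids' loop acts pointwise via pvStep
lemma pvInner_items (lower : List Char) (ids : List String) : ∀ (ks : List String)
    (s : String → String), ks.Nodup → (∀ o ∈ ids, o ∈ ks) →
    ids.foldl (pvA_turnStep lower) (PySem.Dict.mk (ks.map (fun x => (x, s x)))) =
      PySem.Dict.mk (ks.map (fun x => (x, if x ∈ ids then pvStep lower x (s x) else s x))) := by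
  induction ids with
  | nil => intro ks s _ _; simp
  | cons o rest ih =>
    intro ks s hnd hsub
    have ho : o ∈ ks := hsub o (List.mem_cons_self ..)
    have hstep : pvA_turnStep lower (PySem.Dict.mk (ks.map (fun x => (x, s x)))) o =
        PySem.Dict.mk (ks.map (fun x => (x, if x = o then pvStep lower o (s o) else s x))) := by
      unfold pvA_turnStep pvStep
      rw [pvShaped_getD ks s o hnd ho]
      split_ifs with h1 h2 h3
      · exact pvShaped_insert_mem ks s o "accept" hnd ho
      · exact pvShaped_insert_mem ks s o "reject" hnd ho
      · congr 1
        refine List.map_congr_left (fun x _ => ?_)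
        by_cases hx : x = o <;> simp [hx]
      · congr 1
        refine List.map_congr_left (fun x _ => ?_)
        by_cases hx : x = o <;> simp [hx]
    rw [List.foldl_cons, hstep,
      ih ks _ hnd (fun x hx => hsub x (List.mem_cons_of_mem _ hx))]
    congr 1
    refine List.map_congr_left (fun x _ => ?_)
    by_cases hxo : x = o <;> by_cases hxr : x ∈ rest <;>
      simp [hxo, hxr, pvStep_idem]

-- the reversed-history loop with break computes, per key, the fold of pvStep
lemma pvLoop_eq (ids : List String) (rev : List String) : ∀ (ks : List String)
    (s : String → String), ks.Nodup → (∀ o, o ∈ ids ↔ o ∈ ks) →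
    pvA_loop ids rev (PySem.Dict.mk (ks.map (fun x => (x, s x)))) =
      PySem.Dict.mk (ks.map (fun x => (x,
        rev.foldl (fun v t => pvStep (PySem.Chars.lower t.toList) x v) (s x)))) := by
  induction rev with
  | nil => intro ks s _ _; rfl
  | cons t rest ih =>
    intro ks s hnd hiff
    show (let lower := PySem.Chars.lower t.toList
          let status' := ids.foldl (pvA_turnStep lower) _
          if status'.values.all (fun v => !(v == "unknown")) then status'
          else pvA_loop ids rest status') = _
    simp only
    rw [pvInner_items _ ids ks s hnd (fun o h => (hiff o).mp h)]
    have hsh : PySem.Dict.mk (ks.map (fun x => (x, if x ∈ ids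
          then pvStep (PySem.Chars.lower t.toList) x (s x) else s x))) =
        PySem.Dict.mk (ks.map (fun x => (x, pvStep (PySem.Chars.lower t.toList) x (s x)))) := by
      congr 1
      exact List.map_congr_left (fun x hx => by simp [(hiff x).mpr hx])
    rw [hsh]
    set s1 : String → String := fun x => pvStep (PySem.Chars.lower t.toList) x (s x) with hs1
    by_cases hall : (PySem.Dict.mk (ks.map (fun x => (x, s1 x)))).values.all
        (fun v => !(v == "unknown")) = true
    · rw [if_pos hall]
      have hne : ∀ x ∈ ks, s1 x ≠ "unknown" := by
        intro x hx
        have := List.all_eq_true.mp hall (s1 x) ?_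
        · simpa using this
        · show s1 x ∈ (PySem.Dict.mk (ks.map (fun x => (x, s1 x)))).values
          simp only [PySem.Dict.values_mk, List.map_map]
          exact List.mem_map_of_mem hx
      congr 1
      refine List.map_congr_left (fun x hx => ?_)
      rw [List.foldl_cons]
      rw [pvFoldl_step_keep rest x (s1 x) (hne x hx)]
    · rw [if_neg hall, ih ks s1 hnd hiff]
      congr 1

-- B's forward pass is the filterMap of pvVmap
lemma pvVerdicts_eq_filterMap (history : List String) :
    pvB_verdicts history = history.filterMap pvVmap := by
  have hstep_eq : ∀ (acc : List (List Char × String)) (turn : String),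
      (if PySem.Chars.isIn "accept".toList (PySem.Chars.lower turn.toList)
            && !(PySem.Chars.isIn "reject".toList (PySem.Chars.lower turn.toList)) then
        acc ++ [(PySem.Chars.lower turn.toList, "accept")]
      else if PySem.Chars.isIn "reject".toList (PySem.Chars.lower turn.toList) then
        acc ++ [(PySem.Chars.lower turn.toList, "reject")]
      else acc) = acc ++ (pvVmap turn).toList := by
    intro acc turn
    simp only [pvVmap]
    split_ifs <;> simp
  suffices h : ∀ (l : List String) (acc : List (List Char × String)),
      l.foldl (fun acc turn =>
        let lower := PySem.Chars.lower turn.toList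
        if PySem.Chars.isIn "accept".toList lower && !(PySem.Chars.isIn "reject".toList lower) then
          acc ++ [(lower, "accept")]
        else if PySem.Chars.isIn "reject".toList lower then acc ++ [(lower, "reject")]
        else acc) acc = acc ++ l.filterMap pvVmap by
    simpa [pvB_verdicts] using h history []
  intro l
  induction l with
  | nil => intro acc; simp
  | cons t rest ih =>
    intro acc
    simp only [List.foldl_cons]
    rw [hstep_eq acc t, ih]
    cases hv : pvVmap t <;> simp [hv]

-- B's backward search over the decisive turns equals the per-key pvStep fold
lemma pvLast_eq_foldl (l : List String) (opp : String) :
    pvB_last opp (l.filterMap pvVmap) =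
      l.foldl (fun v t => pvStep (PySem.Chars.lower t.toList) opp v) "unknown" := by
  induction l with
  | nil => rfl
  | cons t rest ih =>
    rw [List.filterMap_cons, List.foldl_cons]
    cases hv : pvVmap t with
    | none =>
      have hstep : pvStep (PySem.Chars.lower t.toList) opp "unknown" = "unknown" := by
        simp only [pvVmap] at hv
        unfold pvStep
        split_ifs at hv ⊢ <;> simp_all
      rw [hstep]
      exact ih
    | some p =>
      obtain ⟨lw, v⟩ := p
      simp only [pvVmap] at hv
      split_ifs at hv with c1 c2
      · obtain ⟨hlw, hvv⟩ : PySem.Chars.lower t.toList = lw ∧ "accept" = v := by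
          simpa using hv
        subst hlw; subst hvv
        cases hsw : PySem.Chars.startswith (PySem.Chars.lower t.toList) (opp.toList ++ [':']) with
        | true =>
          have hstep : pvStep (PySem.Chars.lower t.toList) opp "unknown" = "accept" := by
            simp at c1
            simp [pvStep, hsw, c1]
          rw [hstep, pvFoldl_step_keep rest opp "accept" (by decide)]
          simp [pvB_last, hsw]
        | false =>
          have hstep : pvStep (PySem.Chars.lower t.toList) opp "unknown" = "unknown" := by
            simp [pvStep, hsw]
          rw [hstep]
          simpa [pvB_last, hsw] using ih
      · obtain ⟨hlw, hvv⟩ : PySem.Chars.lower t.toList = lw ∧ "reject" = v := by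
          simpa using hv
        subst hlw; subst hvv
        cases hsw : PySem.Chars.startswith (PySem.Chars.lower t.toList) (opp.toList ++ [':']) with
        | true =>
          have hstep : pvStep (PySem.Chars.lower t.toList) opp "unknown" = "reject" := by
            simp at c2
            simp [pvStep, hsw, c2]
          rw [hstep, pvFoldl_step_keep rest opp "reject" (by decide)]
          simp [pvB_last, hsw]
        | false =>
          have hstep : pvStep (PySem.Chars.lower t.toList) opp "unknown" = "unknown" := by
            simp [pvStep, hsw]
          rw [hstep]
          simpa [pvB_last, hsw] using ih

-- ===== VERDICT (by name: the statement is the Claim_ definition above) =====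
theorem recent_opponent_status_py_spec : Claim_equal_recent_opponent_status_py := by
  intro history ids _
  unfold Spec_recent_opponent_status_py recent_opponent_status_py recent_opponent_status_py_alt
  have hmem : ∀ x, x ∈ ids ↔ x ∈ pvKeysAfter [] ids := by
    intro x
    rw [pvKeysAfter_mem]
    simp
  have hnd : (pvKeysAfter [] ids).Nodup := pvKeysAfter_nodup ids [] List.nodup_nil
  have hA0 : ids.foldl (fun d opp => d.insert opp "unknown") PySem.Dict.empty
      = PySem.Dict.mk ((pvKeysAfter [] ids).map (fun x => (x, "unknown"))) := by
    simpa using pvBuild_items (fun _ => "unknown") ids [] (fun _ => "unknown") List.nodup_nil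
  have hB : ids.foldl (fun d opp => d.insert opp (pvB_last opp (pvB_verdicts history).reverse))
        PySem.Dict.empty
      = PySem.Dict.mk ((pvKeysAfter [] ids).map
          (fun x => (x, pvB_last x (pvB_verdicts history).reverse))) := by
    simpa using pvBuild_items (fun o => pvB_last o (pvB_verdicts history).reverse) ids []
      (fun o => pvB_last o (pvB_verdicts history).reverse) List.nodup_nil
  simp only [hA0, hB]
  rw [pvLoop_eq ids history.reverse (pvKeysAfter [] ids) (fun _ => "unknown") hnd hmem]
  show ((pvKeysAfter [] ids).map _) = ((pvKeysAfter [] ids).map _)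
  refine List.map_congr_left (fun x _ => ?_)
  have hlast : pvB_last x (pvB_verdicts history).reverse
      = history.reverse.foldl (fun v t => pvStep (PySem.Chars.lower t.toList) x v) "unknown" := by
    rw [pvVerdicts_eq_filterMap, ← List.filterMap_reverse, pvLast_eq_foldl]
  rw [hlast]
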